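-- pv_equiv track=rewrite | github.com/Priyanka-125/LeetCode-Solutions | Swap all odd and even bits - GFG/swap-all-odd-and-even-bits.py | swapBits
-- ===== SOURCE A (Python) =====
-- def swapBits(n):
--     #Your code here
--     s=""
--     n=bin(n)
--     n=n.split("b")[1]
--     l=len(n)
--     if(l%2==1):
--        n="0"+n
--     s=""
--     for i in range(0,l,2):
--         s+=n[i+1]
--         s+=n[i]
--     return int(s,2)
-- ===== SOURCE B (Python) =====
-- def _go(m):
--     # swap the two lowest bits, recurse on the rest two bits up
--     if m == 0:
--         return 0
--     return (((m & 1) << 1) | ((m >> 1) & 1)) + 4 * _go(m >> 2)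
--
-- def swapBits(n):
--     return _go(abs(n))
-- ===== Notes on version B (the rewrite author's own statement) =====
-- stated objective: alternative
-- what changed: Replaces A's convert-to-binary-string, pad, character-pair swap and int(s,2) reparse by a direct arithmetic recursion on abs(n) that swaps the two lowest bits and recurses two bits up; no strings at all.
import Mathlib
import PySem

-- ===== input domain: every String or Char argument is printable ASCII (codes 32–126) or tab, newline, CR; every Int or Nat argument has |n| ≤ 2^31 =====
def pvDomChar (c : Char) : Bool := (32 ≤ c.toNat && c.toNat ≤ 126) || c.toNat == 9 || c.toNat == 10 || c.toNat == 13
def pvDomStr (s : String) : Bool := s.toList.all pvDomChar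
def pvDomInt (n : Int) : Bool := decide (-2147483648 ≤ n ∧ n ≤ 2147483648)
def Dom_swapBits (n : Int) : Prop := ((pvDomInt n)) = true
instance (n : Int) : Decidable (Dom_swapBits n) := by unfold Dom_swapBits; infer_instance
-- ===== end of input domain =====

-- B replaces A's build-a-string-and-reparse approach by a direct arithmetic recursion that
-- swaps the two lowest bits and recurses two bits up (objective: alternative/idiomatic).
-- Both versions operate on abs(n): A strips the '-' via bin(n).split("b")[1].

-- ===== PORT A =====
-- strings are modeled as List Char (exact: all characters involved are '0'/'1')

-- helper for Python's bin(): binary digits of m, most significant first ([] for m = 0)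
def pvBinDigits (m : Nat) : List Char :=
  if h : m = 0 then []
  else pvBinDigits (m / 2) ++ [if m % 2 = 1 then '1' else '0']
decreasing_by exact Nat.div_lt_self (Nat.pos_of_ne_zero h) (by norm_num)

-- bin(n).split("b")[1] for n = |input|  (Python's bin(0) = '0b0')
def pvBin (m : Nat) : List Char := if m = 0 then ['0'] else pvBinDigits m

-- int(s, 2) for a string of '0'/'1' characters (exact on such strings)
def pvParseBin (l : List Char) : Nat :=
  l.foldl (fun a c => 2 * a + (if c = '1' then 1 else 0)) 0

def swapBits (n : Int) : Int :=
  let ds := pvBin n.natAbs                                   -- n = bin(n).split("b")[1]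
  let l : Int := ds.length                                   -- l = len(n)
  let ds' := if ds.length % 2 = 1 then '0' :: ds else ds     -- if l % 2 == 1: n = "0" + n
  -- for i in range(0, l, 2): s += n[i+1]; s += n[i]   (indices always in range, so getD's
  -- default is never used)
  let s := (PySem.List.pyRange 0 l 2).foldl
    (fun s i => s ++ [PySem.List.pyGetD ds' (i + 1) '0', PySem.List.pyGetD ds' i '0']) []
  (pvParseBin s : Int)                                       -- return int(s, 2)

-- ===== PORT B =====
def pvGo (m : Nat) : Nat :=
  if h : m = 0 then 0
  else (((m &&& 1) <<< 1) ||| ((m >>> 1) &&& 1)) + 4 * pvGo (m >>> 2)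
decreasing_by
  simpa [Nat.shiftRight_eq_div_pow] using Nat.div_lt_self (Nat.pos_of_ne_zero h) (by norm_num)

def swapBits_alt (n : Int) : Int := (pvGo n.natAbs : Nat)

-- ===== PRECONDITION & SPEC =====
def Spec_swapBits (n : Int) (out : Int) : Prop := out = swapBits_alt n
instance (n : Int) (out : Int) : Decidable (Spec_swapBits n out) := by unfold Spec_swapBits; infer_instance

-- ===== CLAIM (what is proved, stated in full; the proofs are below) =====
def Claim_equal_swapBits : Prop := ∀ (n : Int), Dom_swapBits n → Spec_swapBits n (swapBits n)

-- ===== LEMMAS AND PROOFS =====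

-- B's step in arithmetic form (also valid at 0, where everything vanishes)
theorem pvGo_unfold (m : Nat) : pvGo m = (2 * (m % 2) + (m / 2) % 2) + 4 * pvGo (m / 4) := by
  rw [pvGo]
  rcases Nat.eq_zero_or_pos m with h | h
  · simp [h, pvGo]
  · have h0 : m ≠ 0 := Nat.pos_iff_ne_zero.mp h
    simp only [h0, dif_neg, Nat.shiftRight_eq_div_pow]
    have h1 : m &&& 1 = m % 2 := Nat.and_one_is_mod m
    have h2 : (m / 2 ^ 1) &&& 1 = (m / 2) % 2 := by simpa using Nat.and_one_is_mod (m / 2)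
    rw [h1, h2]
    have : (m % 2) <<< 1 ||| (m / 2) % 2 = 2 * (m % 2) + (m / 2) % 2 := by
      rcases Nat.mod_two_eq_zero_or_one m with e | e <;>
        rcases Nat.mod_two_eq_zero_or_one (m / 2) with e' | e' <;> simp [e, e', Nat.shiftLeft_eq]
    rw [this]
    norm_num [Nat.pow_succ]

-- B distributes over a low/high split at an even bit position
theorem pvGo_split (k : Nat) : ∀ x y : Nat, x < 4 ^ k →
    pvGo (x + y * 4 ^ k) = pvGo x + pvGo y * 4 ^ k := by
  induction k with
  | zero =>
    intro x y hx
    have hx0 : x = 0 := by simpa using hx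
    have h0 : pvGo 0 = 0 := by rw [pvGo]; simp
    subst hx0
    simp [h0]
  | succ k ih =>
    intro x y hx
    have h4 : (4 : Nat) ^ (k + 1) = 4 * 4 ^ k := by ring
    set t : Nat := y * 4 ^ k with ht
    have hM : x + y * 4 ^ (k + 1) = x + 4 * t := by rw [h4, ht]; ring
    rw [hM, pvGo_unfold (x + 4 * t), pvGo_unfold x]
    have e1 : (x + 4 * t) % 2 = x % 2 := by omega
    have e2 : ((x + 4 * t) / 2) % 2 = (x / 2) % 2 := by omega
    have e3 : (x + 4 * t) / 4 = x / 4 + t := by omega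
    have hx4 : x / 4 < 4 ^ k := by
      have : x < 4 ^ k * 4 := by rw [h4] at hx; omega
      exact Nat.div_lt_iff_lt_mul (by norm_num) |>.mpr this
    rw [e1, e2, e3, ht, ih (x / 4) y hx4, h4]
    ring

-- the parser is affine in its accumulator
theorem pvParse_acc (l : List Char) : ∀ a : Nat,
    l.foldl (fun a c => 2 * a + (if c = '1' then 1 else 0)) a
      = a * 2 ^ l.length + pvParseBin l := by
  induction l with
  | nil => intro a; simp [pvParseBin]
  | cons c t ih =>
    intro a
    rw [List.foldl_cons, ih]
    have h2 : pvParseBin (c :: t)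
        = (2 * 0 + (if c = '1' then 1 else 0)) * 2 ^ t.length + pvParseBin t := by
      show List.foldl _ 0 (c :: t) = _
      rw [List.foldl_cons, ih]
    rw [List.length_cons, h2, Nat.pow_succ]
    ring

theorem pvParse_append (l1 l2 : List Char) :
    pvParseBin (l1 ++ l2) = pvParseBin l1 * 2 ^ l2.length + pvParseBin l2 := by
  unfold pvParseBin
  rw [List.foldl_append, pvParse_acc]
  rfl

def pvIsBin (l : List Char) : Prop := ∀ c ∈ l, c = '0' ∨ c = '1'

theorem pvParse_lt (l : List Char) (h : pvIsBin l) : pvParseBin l < 2 ^ l.length := by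
  induction l with
  | nil => simp [pvParseBin]
  | cons c t ih =>
    have hc := h c (by simp)
    have ht : pvIsBin t := fun x hx => h x (by simp [hx])
    have hih := ih ht
    rcases hc with e' | e' <;> subst e' <;>
      rw [show ∀ c t, (c :: t : List Char) = [c] ++ t from fun _ _ => rfl, pvParse_append] <;>
      rw [show (∀ t : List Char, ∀ c : Char, ([c] ++ t).length = t.length + 1) from
            fun _ _ => by simp, Nat.pow_succ]
    · rw [show pvParseBin ['0'] = 0 from rfl]; omega
    · rw [show pvParseBin ['1'] = 1 from rfl]; omega

theorem pvBinDigits_spec (m : Nat) :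
    pvParseBin (pvBinDigits m) = m ∧ pvIsBin (pvBinDigits m) := by
  induction m using Nat.strong_induction_on with
  | _ m ih =>
    rw [pvBinDigits]
    rcases Nat.eq_zero_or_pos m with h | h
    · simp [h, pvParseBin, pvIsBin]
    · have h0 : m ≠ 0 := Nat.pos_iff_ne_zero.mp h
      rw [dif_neg h0]
      obtain ⟨ihv, ihb⟩ := ih (m / 2) (Nat.div_lt_self h (by norm_num))
      constructor
      · rw [pvParse_append, ihv]
        rcases Nat.mod_two_eq_zero_or_one m with e | e <;> simp [e, pvParseBin] <;> omega
      · intro c hc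
        rcases List.mem_append.mp hc with hc | hc
        · exact ihb c hc
        · simp at hc; split_ifs at hc <;> simp [hc]

theorem pvBin_val (m : Nat) : pvParseBin (pvBin m) = m := by
  unfold pvBin
  split_ifs with h
  · simp [h, pvParseBin]
  · exact (pvBinDigits_spec m).1

theorem pvBin_isBin (m : Nat) : pvIsBin (pvBin m) := by
  unfold pvBin
  split_ifs with h
  · intro c hc; simp at hc; simp [hc]
  · exact (pvBinDigits_spec m).2

theorem pvBin_ne_nil (m : Nat) : pvBin m ≠ [] := by
  unfold pvBin
  split_ifs with h
  · simp
  · rw [pvBinDigits]; simp [h]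

-- CORE: parsing the pairwise-swapped string equals B's recursion on the parsed value
theorem pvCore (K : Nat) : ∀ l : List Char, pvIsBin l → l.length = 2 * K →
    pvParseBin ((List.range K).flatMap
        (fun k => [l.getD (2 * k + 1) '0', l.getD (2 * k) '0']))
      = pvGo (pvParseBin l) := by
  induction K with
  | zero =>
    intro l _ hl
    have : l = [] := List.eq_nil_of_length_eq_zero (by omega)
    subst this
    simp [pvParseBin, pvGo]
  | succ K ih =>
    intro l hbin hl
    match l, hl with
    | a :: b :: t, hl =>
      have ht : t.length = 2 * K := by simp at hl; omega
      have hbt : pvIsBin t := fun c hc => hbin c (by simp [hc])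
      have ha := hbin a (by simp)
      have hb := hbin b (by simp)
      -- peel the first pair off the range
      rw [List.range_succ_eq_map, List.flatMap_cons, List.flatMap_map]
      have estep : ∀ k : Nat,
          [(a :: b :: t).getD (2 * Nat.succ k + 1) '0', (a :: b :: t).getD (2 * Nat.succ k) '0']
            = [t.getD (2 * k + 1) '0', t.getD (2 * k) '0'] := by
        intro k
        have e1 : 2 * Nat.succ k + 1 = (2 * k + 1) + 1 + 1 := by omega
        have e2 : 2 * Nat.succ k = (2 * k) + 1 + 1 := by omega
        rw [e1, e2]
        simp [List.getD_cons_succ]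
      have hrw : (List.range K).flatMap
            (fun k => [(a :: b :: t).getD (2 * Nat.succ k + 1) '0',
                       (a :: b :: t).getD (2 * Nat.succ k) '0'])
          = (List.range K).flatMap (fun k => [t.getD (2 * k + 1) '0', t.getD (2 * k) '0']) := by
        apply List.flatMap_congr
        intro k _
        exact estep k
      rw [hrw]
      -- lengths
      have hlenS : ((List.range K).flatMap
          (fun k => [t.getD (2 * k + 1) '0', t.getD (2 * k) '0'])).length = 2 * K := by
        rw [List.length_flatMap]
        simp [Nat.mul_comm]
      -- parse both sides
      have hsplit : pvParseBin (a :: b :: t)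
          = pvParseBin t + pvParseBin [a, b] * 4 ^ K := by
        have := pvParse_append [a, b] t
        simp only [List.cons_append, List.nil_append] at this
        rw [this, ht]
        have : (2 : Nat) ^ (2 * K) = 4 ^ K := by
          rw [pow_mul]; norm_num
        rw [this]; ring
      have hbound : pvParseBin t < 4 ^ K := by
        have := pvParse_lt t hbt
        rw [ht, pow_mul] at this
        simpa using this
      have hgd : (a :: b :: t).getD 0 '0' = a := rfl
      have hgd1 : (a :: b :: t).getD 1 '0' = b := rfl
      simp only [Nat.mul_zero, Nat.zero_add, hgd, hgd1]
      have hL : pvParseBin ([b, a] ++ (List.range K).flatMap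
            (fun k => [t.getD (2 * k + 1) '0', t.getD (2 * k) '0']))
          = pvParseBin [b, a] * 4 ^ K + pvGo (pvParseBin t) := by
        rw [pvParse_append, hlenS, ih t hbt ht]
        congr 1
        rw [pow_mul]; norm_num
      have hswap2 : pvParseBin [b, a] = pvGo (pvParseBin [a, b]) := by
        rcases ha with ea | ea <;> rcases hb with eb | eb <;>
          simp [ea, eb, pvParseBin, pvGo]
      rw [hsplit, pvGo_split K _ _ hbound, ← hswap2, hL]
      ring

-- the Python loop, rewritten as the flatMap over pair indices
theorem pvLoop_eq (ds' : List Char) (l : Int) (hl : 0 < l)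
    (hK : ((l + 1) / 2).toNat = K) :
    (PySem.List.pyRange 0 l 2).foldl
        (fun s i => s ++ [PySem.List.pyGetD ds' (i + 1) '0', PySem.List.pyGetD ds' i '0']) []
      = (List.range K).flatMap
          (fun k => [ds'.getD (2 * k + 1) '0', ds'.getD (2 * k) '0']) := by
  rw [PySem.List.pyRange_of_pos 0 l (by norm_num)]
  have hc : (if (0 : Int) < l then ((l - 0 + 2 - 1) / 2).toNat else 0) = K := by
    rw [if_pos hl, ← hK]; congr 1; ring_nf
  rw [hc, List.foldl_map, PySem.List.foldl_append_eq_flatMap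
    (fun k : Nat => [PySem.List.pyGetD ds' ((0 : Int) + 2 * (k : Int) + 1) '0',
                     PySem.List.pyGetD ds' ((0 : Int) + 2 * (k : Int)) '0'])]
  rw [List.nil_append]
  apply List.flatMap_congr
  intro k _
  have e1 : (0 : Int) + 2 * (k : Int) + 1 = ((2 * k + 1 : Nat) : Int) := by push_cast; ring
  have e2 : (0 : Int) + 2 * (k : Int) = ((2 * k : Nat) : Int) := by push_cast; ring
  rw [e1, e2, PySem.List.pyGetD_natCast, PySem.List.pyGetD_natCast]

-- ===== VERDICT (by name: the statement is the Claim_ definition above) =====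
theorem pvMain (m : Nat) :
    pvParseBin ((PySem.List.pyRange 0 ((pvBin m).length : Int) 2).foldl
      (fun s i => s ++
        [PySem.List.pyGetD (if (pvBin m).length % 2 = 1 then '0' :: pvBin m else pvBin m) (i + 1) '0',
         PySem.List.pyGetD (if (pvBin m).length % 2 = 1 then '0' :: pvBin m else pvBin m) i '0']) [])
      = pvGo m := by
  set ds := pvBin m with hds
  set ds' := (if ds.length % 2 = 1 then '0' :: ds else ds) with hds'
  have hpos : 0 < ds.length := List.length_pos_of_ne_nil (pvBin_ne_nil m)
  set K := (ds.length + 1) / 2 with hKdef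
  have hlen' : ds'.length = 2 * K := by
    rw [hds']; split_ifs with h <;> simp only [List.length_cons, hKdef] <;> omega
  have hKi : (((ds.length : Int) + 1) / 2).toNat = K := by
    rw [hKdef]; omega
  have hbin' : pvIsBin ds' := by
    rw [hds']
    split_ifs with h
    · intro c hc
      rcases List.mem_cons.mp hc with e | hc
      · simp [e]
      · exact pvBin_isBin m c hc
    · exact pvBin_isBin m
  have hval' : pvParseBin ds' = m := by
    rw [hds']
    split_ifs with h
    · have h2 := pvParse_append ['0'] ds
      simp only [List.cons_append, List.nil_append] at h2
      rw [h2, show pvParseBin ['0'] = 0 from rfl, hds, pvBin_val m]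
      simp
    · exact pvBin_val m
  rw [pvLoop_eq ds' (ds.length : Int) (by exact_mod_cast hpos) hKi,
      pvCore K ds' hbin' hlen', hval']

theorem swapBits_spec : Claim_equal_swapBits := by
  intro n _
  show swapBits n = swapBits_alt n
  exact congrArg (fun x : Nat => (x : Int)) (pvMain n.natAbs)
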